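-- pv_equiv track=rewrite | github.com/junhaz4/leetcode-notes | OA&Interview/Goldman.py | lotteryCoupon
-- ===== SOURCE A (Python) =====
-- def lotteryCoupon(n):
--   if n < 10:
--     return n
--   res = []
--   for i in range(n):
--     temp = i+1
--     digit = 0
--     while temp > 0:
--       digit += temp%10
--       temp = temp//10
--     res.append(digit)
--   winner_dict = dict()
--   for i in res:
--     if i not in winner_dict:
--       winner_dict[i] = 1
--     else:
--       winner_dict[i] += 1
--   result = 0
--   max_num = 0
--   for value in winner_dict.values():
--     if value > max_num:
--       max_num = value
--       result = 0
--     if value == max_num: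
--       result += 1
--   return result
-- ===== SOURCE B (Python) =====
-- def lotteryCoupon(n):
--     if n < 10:
--         return n
--     # number of decimal digits of n
--     k = 0
--     t = n
--     while t > 0:
--         k += 1
--         t //= 10
--     top = 9 * k  # largest possible digit sum of a number <= n
--
--     def dsum(m):
--         s = 0
--         while m > 0:
--             s += m % 10
--             m //= 10
--         return s
--
--     memo = {}
--
--     def cnt(m, s):
--         # how many y in [0, m] have digit sum exactly s (digit DP on the digits of m)
--         if s < 0:
--             return 0
--         if m < 10:
--             return 1 if s <= m else 0
--         key = (m, s)
--         if key in memo: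
--             return memo[key]
--         q, r = divmod(m, 10)
--         total = sum(cnt(q - 1, s - b) for b in range(10))
--         if 0 <= s - dsum(q) <= r:
--             total += 1
--         memo[key] = total
--         return total
--
--     counts = [cnt(n, s) for s in range(1, top + 1)]
--     m = max(counts)
--     return counts.count(m)
-- ===== Notes on version B (the rewrite author's own statement) =====
-- stated objective: faster
-- what changed: Instead of computing the digit sum of every integer 1..n and counting frequencies in a dict, B counts how many integers in [0,n] have each digit sum by a memoized digit-DP recursion on the decimal digits of n, then takes the count of the maximal frequency over the possible digit sums 1..9*len(n).
import Mathlib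
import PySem

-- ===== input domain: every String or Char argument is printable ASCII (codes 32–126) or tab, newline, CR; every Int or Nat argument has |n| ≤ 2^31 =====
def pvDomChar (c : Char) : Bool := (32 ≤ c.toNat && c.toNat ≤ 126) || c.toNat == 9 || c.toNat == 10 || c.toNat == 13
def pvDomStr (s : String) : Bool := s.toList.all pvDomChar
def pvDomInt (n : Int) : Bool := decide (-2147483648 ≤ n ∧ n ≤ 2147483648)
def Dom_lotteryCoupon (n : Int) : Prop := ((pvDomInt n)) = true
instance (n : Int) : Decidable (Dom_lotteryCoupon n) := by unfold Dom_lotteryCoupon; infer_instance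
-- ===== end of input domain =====

-- B replaces A's per-integer digit-sum loop over 1..n by a digit-DP count per digit sum (objective: faster, asymptotically).

-- ===== PORT A =====
-- A's inner while loop: digit += temp % 10; temp //= 10
def pvDigitsA (temp digit : Int) : Int :=
  if h : temp > 0 then
    pvDigitsA (PySem.Int.floordiv temp 10) (digit + PySem.Int.mod temp 10)
  else digit
termination_by temp.toNat
decreasing_by
  rw [PySem.Int.floordiv_eq_ediv_of_pos (by norm_num)]
  omega

def lotteryCoupon (n : Int) : Int :=
  if n < 10 then n
  else
    -- res.append(digit) over i in range(n)
    let res := (PySem.List.pyRange 0 n 1).foldl (fun acc i => acc ++ [pvDigitsA (i + 1) 0]) []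
    -- counting dict: if i not in d: d[i] = 1 else: d[i] += 1
    let wd := res.foldl (fun d i =>
        if d.contains i = false then d.insert i 1
        else d.insert i (d.getD i 0 + 1)) PySem.Dict.empty
    -- loop над values with accumulators (result, max_num)
    let p := wd.values.foldl (fun (rm : Int × Int) v =>
        let rm1 := if v > rm.2 then ((0 : Int), v) else rm
        if v == rm1.2 then (rm1.1 + 1, rm1.2) else rm1) ((0 : Int), (0 : Int))
    p.1

-- ===== PORT B =====
-- B's digit-count loop: k += 1; t //= 10
def pvDigitLenB (t k : Int) : Int :=
  if h : t > 0 then pvDigitLenB (PySem.Int.floordiv t 10) (k + 1) else k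
termination_by t.toNat
decreasing_by
  rw [PySem.Int.floordiv_eq_ediv_of_pos (by norm_num)]
  omega

-- B's dsum helper (while loop)
def pvDsumB (m s : Int) : Int :=
  if h : m > 0 then pvDsumB (PySem.Int.floordiv m 10) (s + PySem.Int.mod m 10) else s
termination_by m.toNat
decreasing_by
  rw [PySem.Int.floordiv_eq_ediv_of_pos (by norm_num)]
  omega

-- B's memoized recursion cnt(m, s) (memoisation only shares work; the recursion is ported as is,
-- with the inner 'sum(cnt(q-1, s-b) for b in range(10))' as the structural recursion pvCntSumB)
mutual
def pvCntB (m s : Int) : Int :=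
  if s < 0 then 0
  else if hm : m < 10 then (if s ≤ m then 1 else 0)
  else
    let q := PySem.Int.floordiv m 10
    let r := PySem.Int.mod m 10
    let total := pvCntSumB (q - 1) s 10
    if 0 ≤ s - pvDsumB q 0 ∧ s - pvDsumB q 0 ≤ r then total + 1 else total
termination_by m.toNat * 11
decreasing_by
  rw [PySem.Int.floordiv_eq_ediv_of_pos (by norm_num)]
  omega

def pvCntSumB (m s : Int) (b : Nat) : Int :=
  match b with
  | 0 => 0
  | Nat.succ b' => pvCntSumB m s b' + pvCntB m (s - (b' : Int))
termination_by m.toNat * 11 + b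
decreasing_by
  · omega
  · omega
end

def lotteryCoupon_alt (n : Int) : Int :=
  if n < 10 then n
  else
    let top := 9 * pvDigitLenB n 0
    let counts := (PySem.List.pyRange 1 (top + 1) 1).map (fun s => pvCntB n s)
    -- max(counts); counts is nonempty here (n ≥ 10 gives top ≥ 18), so .getD 0 is never taken
    let m := (PySem.List.max? counts (fun x => x)).getD 0
    ((PySem.List.count counts m : Nat) : Int)

-- ===== PRECONDITION & SPEC =====
def Spec_lotteryCoupon (n : Int) (out : Int) : Prop := out = lotteryCoupon_alt n
instance (n : Int) (out : Int) : Decidable (Spec_lotteryCoupon n out) := by unfold Spec_lotteryCoupon; infer_instance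

-- ===== CLAIM (what is proved, stated in full; the proofs are below) =====
def Claim_equal_lotteryCoupon : Prop := ∀ (n : Int), Dom_lotteryCoupon n → Spec_lotteryCoupon n (lotteryCoupon n)

-- ===== LEMMAS AND PROOFS =====

-- mathematical digit sum and decimal length
def dsumN (m : Nat) : Nat :=
  if m = 0 then 0 else dsumN (m / 10) + m % 10
decreasing_by omega

def nlenN (m : Nat) : Nat :=
  if m = 0 then 0 else nlenN (m / 10) + 1
decreasing_by omega

lemma dsumN_lt_ten {m : Nat} (h : m < 10) : dsumN m = m := by
  rw [dsumN]
  rcases Nat.eq_zero_or_pos m with h0 | h0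
  · simp [h0]
  · have : m / 10 = 0 := by omega
    rw [if_neg (by omega), this, dsumN]
    simp; omega

lemma dsumN_mul_add (a b : Nat) (hb : b < 10) : dsumN (10 * a + b) = dsumN a + b := by
  rw [dsumN]
  by_cases h0 : 10 * a + b = 0
  · have ha : a = 0 := by omega
    have hb0 : b = 0 := by omega
    subst ha; subst hb0; simp [dsumN]
  · rw [if_neg h0]
    have h1 : (10 * a + b) / 10 = a := by omega
    have h2 : (10 * a + b) % 10 = b := by omega
    rw [h1, h2]

lemma dsumN_pos {m : Nat} (h : 0 < m) : 0 < dsumN m := by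
  induction m using Nat.strong_induction_on with
  | _ m ih =>
    rw [dsumN, if_neg (by omega)]
    rcases Nat.eq_zero_or_pos (m % 10) with h1 | h1
    · have h2 : 0 < m / 10 := by omega
      have := ih (m / 10) (by omega) h2
      omega
    · omega

lemma nlenN_pos {m : Nat} (h : 0 < m) : 0 < nlenN m := by
  rw [nlenN, if_neg (by omega)]; omega

lemma nlenN_mono {m m' : Nat} (h : m ≤ m') : nlenN m ≤ nlenN m' := by
  induction m' using Nat.strong_induction_on generalizing m with
  | _ m' ih =>
    rcases Nat.eq_zero_or_pos m with h0 | h0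
    · rw [h0]; rw [nlenN]; simp
    · have hm' : 0 < m' := by omega
      have hm'eq : nlenN m' = nlenN (m' / 10) + 1 := by rw [nlenN, if_neg (by omega)]
      rw [nlenN, if_neg (by omega), hm'eq]
      have : nlenN (m / 10) ≤ nlenN (m' / 10) := by
        rcases Nat.eq_zero_or_pos (m' / 10) with hq | hq
        · have : m / 10 = 0 := by omega
          rw [this, hq]
        · exact ih (m' / 10) (by omega) (by omega)
      omega

lemma dsumN_le (m : Nat) : dsumN m ≤ 9 * nlenN m := by
  induction m using Nat.strong_induction_on with
  | _ m ih =>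
    rcases Nat.eq_zero_or_pos m with h0 | h0
    · rw [h0, dsumN, nlenN]; simp
    · rw [dsumN, if_neg (by omega), nlenN, if_neg (by omega)]
      have := ih (m / 10) (by omega)
      omega

lemma pvDigitsA_eq (M : Nat) : ∀ d : Int, pvDigitsA (M : Int) d = d + (dsumN M : Int) := by
  induction M using Nat.strong_induction_on with
  | _ M ih =>
    intro d
    rw [pvDigitsA]
    by_cases h : (M : Int) > 0
    · rw [dif_pos h]
      have hM : 0 < M := by exact_mod_cast h
      have hq : PySem.Int.floordiv (M : Int) 10 = ((M / 10 : Nat) : Int) := by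
        exact_mod_cast PySem.Int.floordiv_natCast M 10
      have hr : PySem.Int.mod (M : Int) 10 = ((M % 10 : Nat) : Int) := by
        exact_mod_cast PySem.Int.mod_natCast M 10
      rw [hq, hr, ih (M / 10) (by omega)]
      have : dsumN M = dsumN (M / 10) + M % 10 := by rw [dsumN, if_neg (by omega)]
      rw [this]
      push_cast
      ring
    · rw [dif_neg h]
      have hM : M = 0 := by omega
      rw [hM, dsumN]
      simp

lemma pvDsumB_eq (M : Nat) : ∀ s : Int, pvDsumB (M : Int) s = s + (dsumN M : Int) := by
  induction M using Nat.strong_induction_on with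
  | _ M ih =>
    intro s
    rw [pvDsumB]
    by_cases h : (M : Int) > 0
    · rw [dif_pos h]
      have hM : 0 < M := by exact_mod_cast h
      have hq : PySem.Int.floordiv (M : Int) 10 = ((M / 10 : Nat) : Int) := by
        exact_mod_cast PySem.Int.floordiv_natCast M 10
      have hr : PySem.Int.mod (M : Int) 10 = ((M % 10 : Nat) : Int) := by
        exact_mod_cast PySem.Int.mod_natCast M 10
      rw [hq, hr, ih (M / 10) (by omega)]
      have : dsumN M = dsumN (M / 10) + M % 10 := by rw [dsumN, if_neg (by omega)]
      rw [this]
      push_cast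
      ring
    · rw [dif_neg h]
      have hM : M = 0 := by omega
      rw [hM, dsumN]
      simp

lemma pvDigitLenB_eq (M : Nat) : ∀ k : Int, pvDigitLenB (M : Int) k = k + (nlenN M : Int) := by
  induction M using Nat.strong_induction_on with
  | _ M ih =>
    intro k
    rw [pvDigitLenB]
    by_cases h : (M : Int) > 0
    · rw [dif_pos h]
      have hM : 0 < M := by exact_mod_cast h
      have hq : PySem.Int.floordiv (M : Int) 10 = ((M / 10 : Nat) : Int) := by
        exact_mod_cast PySem.Int.floordiv_natCast M 10
      rw [hq, ih (M / 10) (by omega)]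
      have : nlenN M = nlenN (M / 10) + 1 := by rw [nlenN, if_neg (by omega)]
      rw [this]
      push_cast
      ring
    · rw [dif_neg h]
      have hM : M = 0 := by omega
      rw [hM, nlenN]
      simp

-- count of y in range M with digit sum s
def cntSpec (M : Nat) (s : Int) : Nat :=
  (List.range M).countP (fun y => decide ((dsumN y : Int) = s))

lemma cntSpec_succ (M : Nat) (s : Int) :
    cntSpec (M + 1) s = cntSpec M s + (if (dsumN M : Int) = s then 1 else 0) := by
  unfold cntSpec
  rw [List.range_succ, List.countP_append]
  simp

-- window: exactly one b in 0..r has D + b = s, if s lies in [D, D+r]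
lemma tight_window (r D : Nat) (s : Int) :
    (List.range (r + 1)).countP (fun b : Nat => decide ((D : Int) + (b : Int) = s)) =
      if (D : Int) ≤ s ∧ s ≤ (D : Int) + r then 1 else 0 := by
  induction r with
  | zero =>
    rw [List.range_one]
    simp only [List.countP_cons, List.countP_nil, decide_eq_true_eq]
    split_ifs <;> push_cast at * <;> omega
  | succ r ih =>
    rw [List.range_succ, List.countP_append, ih]
    simp only [List.countP_cons, List.countP_nil, decide_eq_true_eq]
    split_ifs <;> push_cast at * <;> omega

-- main splitting: numbers below 10*Q, by last digit
lemma sum_map_ite (l : List Nat) (p : Nat → Bool) :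
    (l.map (fun b => if p b then 1 else 0)).sum = l.countP p := by
  induction l with
  | nil => simp
  | cons x t ih => simp [List.countP_cons, ih]; split_ifs <;> omega

lemma cntSpec_mul_ten (Q : Nat) (s : Int) :
    cntSpec (10 * Q) s = ((List.range 10).map (fun b : Nat => cntSpec Q (s - (b : Int)))).sum := by
  induction Q generalizing s with
  | zero =>
    show (List.range (10 * 0)).countP _ = _
    rw [Nat.mul_zero]
    rw [List.range_zero]
    rw [List.countP_nil]
    have : ∀ b : Nat, cntSpec 0 (s - (b : Int)) = 0 := by
      intro b; unfold cntSpec; rw [List.range_zero, List.countP_nil]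
    rw [List.map_congr_left (fun b _ => this b)]
    refine (List.sum_eq_zero ?_).symm
    intro x hx
    rcases List.mem_map.mp hx with ⟨b, hb, h⟩
    omega

  | succ Q ih =>
    have hr : 10 * (Q + 1) = 10 * Q + 10 := by ring
    rw [hr]
    unfold cntSpec
    rw [List.range_add, List.countP_append, List.countP_map]
    have hleft : (List.range (10 * Q)).countP (fun y => decide ((dsumN y : Int) = s))
        = cntSpec (10 * Q) s := rfl
    rw [hleft, ih]
    have hright : (List.range 10).countP
          ((fun y => decide ((dsumN y : Int) = s)) ∘ (fun x => 10 * Q + x))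
        = (List.range 10).countP (fun b : Nat => decide ((dsumN Q : Int) + (b : Int) = s)) := by
      apply List.countP_congr
      intro b hb
      have hb10 : b < 10 := List.mem_range.mp hb
      simp only [Function.comp]
      rw [dsumN_mul_add Q b hb10]
      simp only [decide_eq_true_eq]
      push_cast
      constructor <;> intro h <;> omega
    rw [hright]
    have hsum : ∀ b : Nat, cntSpec (Q + 1) (s - (b : Int))
        = cntSpec Q (s - (b : Int)) + (if (dsumN Q : Int) + b = s then 1 else 0) := by
      intro b
      rw [cntSpec_succ]
      congr 1
      split_ifs <;> omega
    calc ((List.range 10).map (fun b : Nat => cntSpec Q (s - (b : Int)))).sum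
          + (List.range 10).countP (fun b : Nat => decide ((dsumN Q : Int) + (b : Int) = s))
        = ((List.range 10).map (fun b : Nat => cntSpec Q (s - (b : Int)))).sum
          + ((List.range 10).map (fun b : Nat => if (dsumN Q : Int) + (b : Int) = s then 1 else 0)).sum := by
          rw [← sum_map_ite (List.range 10) (fun b : Nat => decide ((dsumN Q : Int) + (b : Int) = s))]
          simp only [decide_eq_true_eq]
      _ = ((List.range 10).map (fun b : Nat => cntSpec (Q + 1) (s - (b : Int)))).sum := by
          rw [← List.sum_map_add]
          apply congrArg
          apply List.map_congr_left
          intro b _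
          rw [hsum b]

lemma pvCntSumB_eq (b : Nat) (m s : Int) :
    pvCntSumB m s b = ((List.range b).map (fun j : Nat => pvCntB m (s - (j : Int)))).sum := by
  induction b with
  | zero => rw [pvCntSumB]; simp
  | succ b ih => rw [pvCntSumB, ih, List.range_succ]; simp

lemma countP_range_int (M : Nat) (s : Int) :
    (List.range M).countP (fun y : Nat => decide ((y : Int) = s)) =
      if 0 ≤ s ∧ s < (M : Int) then 1 else 0 := by
  induction M with
  | zero => simp
  | succ M ih =>
    rw [List.range_succ, List.countP_append, ih]
    simp only [List.countP_cons, List.countP_nil, decide_eq_true_eq]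
    split_ifs <;> push_cast at * <;> omega

-- digit-DP correctness
lemma pvCntB_eq (M : Nat) : ∀ s : Int, pvCntB (M : Int) s = (cntSpec (M + 1) s : Int) := by
  induction M using Nat.strong_induction_on with
  | _ M ih =>
    intro s
    rw [pvCntB]
    by_cases hs : s < 0
    · rw [if_pos hs]
      have h0 : cntSpec (M + 1) s = 0 := by
        apply List.countP_eq_zero.mpr
        intro y hy
        simp only [decide_eq_true_eq]
        intro h
        omega
      rw [h0]
      simp
    · rw [if_neg hs]
      by_cases hm : (M : Int) < 10
      · rw [dif_pos hm]
        have hcong : cntSpec (M + 1) s = (List.range (M + 1)).countP (fun y : Nat => decide ((y : Int) = s)) := by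
          unfold cntSpec
          apply List.countP_congr
          intro y hy
          have hy10 : y < 10 := by have := List.mem_range.mp hy; omega
          rw [dsumN_lt_ten hy10]
        rw [hcong, countP_range_int]
        split_ifs <;> push_cast at * <;> omega
      · rw [dif_neg hm]
        have hM10 : 10 ≤ M := by omega
        have hq : PySem.Int.floordiv (M : Int) 10 = ((M / 10 : Nat) : Int) := by
          exact_mod_cast PySem.Int.floordiv_natCast M 10
        have hr : PySem.Int.mod (M : Int) 10 = ((M % 10 : Nat) : Int) := by
          exact_mod_cast PySem.Int.mod_natCast M 10
        have hq1 : ((M / 10 : Nat) : Int) - 1 = ((M / 10 - 1 : Nat) : Int) := by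
          have h1 : 1 ≤ M / 10 := by omega
          push_cast [h1]
          ring
        have hT : pvCntSumB (((M / 10 : Nat) : Int) - 1) s 10
            = ((((List.range 10).map (fun j : Nat => cntSpec (M / 10) (s - (j : Int))))).sum : Int) := by
          rw [hq1, pvCntSumB_eq]
          have hQ : M / 10 - 1 + 1 = M / 10 := by omega
          have hel : ∀ j : Nat, j ∈ List.range 10 →
              pvCntB ((M / 10 - 1 : Nat) : Int) (s - (j : Int))
                = ((cntSpec (M / 10) (s - (j : Int)) : Nat) : Int) := by
            intro j _
            rw [ih (M / 10 - 1) (by omega) (s - (j : Int)), hQ]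
          rw [List.map_congr_left hel]
          rw [show (fun j : Nat => ((cntSpec (M / 10) (s - (j : Int)) : Nat) : Int))
                = (fun c : Nat => (c : Int)) ∘ (fun j : Nat => cntSpec (M / 10) (s - (j : Int))) from rfl,
              ← List.map_map]
          exact (Nat.cast_list_sum _).symm
        have hD : pvDsumB ((M / 10 : Nat) : Int) 0 = ((dsumN (M / 10) : Nat) : Int) := by
          rw [pvDsumB_eq]
          ring
        have hsplit : cntSpec (M + 1) s = cntSpec (10 * (M / 10)) s
            + (List.range (M % 10 + 1)).countP (fun b : Nat => decide ((dsumN (M / 10) : Int) + (b : Int) = s)) := by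
          unfold cntSpec
          have hM1 : M + 1 = 10 * (M / 10) + (M % 10 + 1) := by omega
          rw [hM1, List.range_add, List.countP_append, List.countP_map]
          congr 1
          apply List.countP_congr
          intro b hb
          have hb10 : b < M % 10 + 1 := List.mem_range.mp hb
          simp only [Function.comp, decide_eq_true_eq]
          rw [dsumN_mul_add (M / 10) b (by omega)]
          push_cast
          constructor <;> intro <;> omega
        rw [hsplit, cntSpec_mul_ten, tight_window]
        simp only [hq, hr, hT, hD]
        push_cast
        split_ifs <;> push_cast at * <;> omega

-- the list of digit sums of 1..N
def resSpec (N : Nat) : List Int := (List.range N).map (fun k => (dsumN (k + 1) : Int))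

-- A's max/count fold over a list of values
def stepA (rm : Int × Int) (v : Int) : Int × Int :=
  let rm1 := if v > rm.2 then ((0 : Int), v) else rm
  if v == rm1.2 then (rm1.1 + 1, rm1.2) else rm1

lemma foldl_stepA (l : List Int) : ∀ (r m : Int),
    l.foldl stepA (r, m) =
      (if l.foldl max m = m then r + (l.countP (fun v => decide (v = m)) : Int)
       else (l.countP (fun v => decide (v = l.foldl max m)) : Int),
       l.foldl max m) := by
  induction l with
  | nil => intro r m; simp
  | cons v t ih =>
    intro r m
    rw [List.foldl_cons, List.foldl_cons]
    by_cases h1 : v > m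
    · have hstep : stepA (r, m) v = (1, v) := by
        unfold stepA
        rw [if_pos h1]
        simp
      rw [hstep, ih 1 v]
      have hmax : max m v = v := by omega
      rw [hmax]
      have hv : v ≤ List.foldl max v t := (PySem.List.le_foldl_max t v).1
      have hne : ¬ (List.foldl max v t = m) := by omega
      rw [if_neg hne]
      by_cases h2 : List.foldl max v t = v
      · rw [if_pos h2, h2]
        simp [List.countP_cons, Prod.mk.injEq]
        omega
      · rw [if_neg h2]
        have hvne : ¬ (v = List.foldl max v t) := fun h => h2 h.symm
        simp [List.countP_cons, hvne, Prod.mk.injEq]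
    · by_cases h2 : v = m
      · have hstep : stepA (r, m) v = (r + 1, m) := by
          unfold stepA
          rw [if_neg h1]
          simp [h2]
        rw [hstep, ih (r + 1) m]
        have hmax : max m v = m := by omega
        rw [hmax]
        by_cases h3 : List.foldl max m t = m
        · rw [if_pos h3, if_pos h3]
          simp [List.countP_cons, h2, Prod.mk.injEq]
          omega
        · rw [if_neg h3, if_neg h3]
          have hm : m ≤ List.foldl max m t := (PySem.List.le_foldl_max t m).1
          have hvne : ¬ (v = List.foldl max m t) := by omega
          simp [List.countP_cons, hvne, Prod.mk.injEq]
      · have hlt : v < m := by omega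
        have hstep : stepA (r, m) v = (r, m) := by
          unfold stepA
          rw [if_neg h1]
          simp [h2]
        rw [hstep, ih r m]
        have hmax : max m v = m := by omega
        rw [hmax]
        by_cases h3 : List.foldl max m t = m
        · rw [if_pos h3, if_pos h3]
          simp [List.countP_cons, h2, Prod.mk.injEq]
        · rw [if_neg h3, if_neg h3]
          have hm : m ≤ List.foldl max m t := (PySem.List.le_foldl_max t m).1
          have hvne : ¬ (v = List.foldl max m t) := by omega
          simp [List.countP_cons, hvne, Prod.mk.injEq]

-- equal countP over two nodup lists agreeing on the support of p
lemma countP_eq_of_nodup {K L : List Int} (p : Int → Bool)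
    (hK : K.Nodup) (hL : L.Nodup)
    (h : ∀ s, p s = true → (s ∈ K ∧ s ∈ L)) :
    K.countP p = L.countP p := by
  rw [List.countP_eq_length_filter, List.countP_eq_length_filter]
  apply List.Perm.length_eq
  apply (List.perm_ext_iff_of_nodup (hK.filter p) (hL.filter p)).mpr
  intro a
  simp only [List.mem_filter]
  constructor
  · rintro ⟨haK, hpa⟩
    exact ⟨(h a hpa).2, hpa⟩
  · rintro ⟨haL, hpa⟩
    exact ⟨(h a hpa).1, hpa⟩

-- the dict-values list of A, and its running maximum
def valsA (N : Nat) : List Int :=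
  (PySem.Set.ofList (resSpec N)).map (fun s => ((resSpec N).count s : Int))

def maxA (N : Nat) : Int := (valsA N).foldl max 0

-- digit sums of 1..N lie in [1, 9 * nlenN N]
lemma mem_resSpec_bounds {N : Nat} {s : Int} (h : s ∈ resSpec N) :
    1 ≤ s ∧ s ≤ ((9 * nlenN N : Nat) : Int) := by
  rcases List.mem_map.mp h with ⟨k, hk, rfl⟩
  have hk' : k < N := List.mem_range.mp hk
  have h1 := dsumN_pos (m := k + 1) (by omega)
  have h2 := dsumN_le (k + 1)
  have h3 := nlenN_mono (show k + 1 ≤ N by omega)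
  constructor <;> push_cast <;> omega

lemma cntSpec_eq_count (N : Nat) (s : Int) (hs : 1 ≤ s) :
    cntSpec (N + 1) s = (resSpec N).count s := by
  unfold cntSpec resSpec
  rw [List.count_eq_countP, List.countP_map, List.range_succ_eq_map, List.countP_cons, List.countP_map]
  have h0 : dsumN 0 = 0 := by rw [dsumN]; simp
  have : (decide ((dsumN 0 : Int) = s)) = false := by
    rw [h0]; simp; omega
  rw [this]
  simp only [if_false, Nat.add_zero, Bool.false_eq_true]
  apply List.countP_congr
  intro k _
  simp [Function.comp, Nat.succ_eq_add_one]

lemma maxA_nonneg (N : Nat) : 0 ≤ maxA N :=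
  le_trans (by norm_num) (PySem.List.le_foldl_max (valsA N) 0).1

lemma maxA_pos {N : Nat} (hN : 1 ≤ N) : 1 ≤ maxA N := by
  have hres : resSpec N ≠ [] := by
    unfold resSpec
    simp
    omega
  obtain ⟨s0, hs0⟩ := List.exists_mem_of_ne_nil _ hres
  have hs0' : s0 ∈ PySem.Set.ofList (resSpec N) := (PySem.Set.mem_ofList _ _).mpr hs0
  have hv : ((resSpec N).count s0 : Int) ∈ valsA N := List.mem_map_of_mem hs0'
  have hc : 0 < (resSpec N).count s0 := List.count_pos_iff.mpr hs0
  have := (PySem.List.le_foldl_max (valsA N) 0).2 _ hv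
  unfold maxA
  omega

lemma A_char {N : Nat} (hN : 10 ≤ N) :
    lotteryCoupon (N : Int) = ((valsA N).countP (fun v => decide (v = maxA N)) : Int) := by
  rw [lotteryCoupon, if_neg (by omega)]
  have hres : (PySem.List.pyRange 0 (N : Int) 1).foldl (fun acc i => acc ++ [pvDigitsA (i + 1) 0]) []
      = resSpec N := by
    rw [PySem.List.foldl_append_singleton_eq_map, PySem.List.pyRange_one, List.map_map, List.nil_append]
    have hnt : ((N : Int) - 0).toNat = N := by omega
    rw [hnt]
    unfold resSpec
    apply List.map_congr_left
    intro k hk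
    simp only [Function.comp]
    have hcast : (0 : Int) + (k : Int) + 1 = ((k + 1 : Nat) : Int) := by push_cast; ring
    rw [hcast, pvDigitsA_eq, zero_add]
  simp only [hres]
  have hstep : ∀ (d : PySem.Dict Int Int), ∀ i ∈ resSpec N,
      (if d.contains i = false then d.insert i 1 else d.insert i (d.getD i 0 + 1))
        = d.insert i (d.getD i 0 + 1) := by
    intro d i _
    by_cases hc : d.contains i
    · rw [if_neg (by simp [hc])]
    · rw [if_pos (Bool.eq_false_iff.mpr hc), PySem.Dict.getD_of_not_contains d 0 (Bool.eq_false_iff.mpr hc), zero_add]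
  rw [PySem.List.foldl_congr_mem (resSpec N) _ _ PySem.Dict.empty hstep]
  set wd := List.foldl (fun (d : PySem.Dict Int Int) i => d.insert i (d.getD i 0 + 1)) PySem.Dict.empty (resSpec N) with hwd
  have hnd : wd.keys.Nodup :=
    PySem.Dict.nodup_keys_foldl_insert _ _ _ PySem.Dict.nodup_keys_empty
  have hkeys : wd.keys = PySem.Set.ofList (resSpec N) := by
    rw [hwd, PySem.Dict.keys_foldl_insert, PySem.Dict.keys_empty, PySem.Set.update_nil_left]
  have hget : ∀ v : Int, wd.getD v 0 = ((resSpec N).count v : Int) := by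
    intro v
    rw [hwd, PySem.Dict.getD_foldl_insert_add_one, PySem.Dict.getD_empty, zero_add]
  have hvals : wd.values = valsA N := by
    rw [PySem.Dict.values_eq_map_keys wd hnd 0, hkeys]
    unfold valsA
    apply List.map_congr_left
    intro v _
    rw [hget]
  rw [hvals]
  have hlam : (fun (rm : Int × Int) v =>
      let rm1 := if v > rm.2 then ((0 : Int), v) else rm
      if v == rm1.2 then (rm1.1 + 1, rm1.2) else rm1) = stepA := rfl
  rw [hlam, foldl_stepA]
  have hmax1 : 1 ≤ maxA N := maxA_pos (by omega)
  have hne0 : ¬ ((valsA N).foldl max 0 = 0) := by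
    unfold maxA at hmax1
    omega
  rw [if_neg hne0]
  rfl

lemma B_char {N : Nat} (hN : 10 ≤ N) :
    lotteryCoupon_alt (N : Int)
      = ((PySem.List.pyRange 1 (((9 * nlenN N : Nat) : Int) + 1) 1).countP
          (fun s => decide (((resSpec N).count s : Int) = maxA N)) : Int) := by
  rw [lotteryCoupon_alt, if_neg (by omega)]
  have htop : 9 * pvDigitLenB (N : Int) 0 = ((9 * nlenN N : Nat) : Int) := by
    rw [pvDigitLenB_eq, zero_add]
    push_cast
    ring
  simp only [htop]
  have hcounts : (PySem.List.pyRange 1 (((9 * nlenN N : Nat) : Int) + 1) 1).map (fun s => pvCntB (N : Int) s)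
      = (PySem.List.pyRange 1 (((9 * nlenN N : Nat) : Int) + 1) 1).map (fun s => ((resSpec N).count s : Int)) := by
    apply List.map_congr_left
    intro s hs
    have h1 : 1 ≤ s := (PySem.List.mem_pyRange_one.mp hs).1
    rw [pvCntB_eq, cntSpec_eq_count N s h1]
  rw [hcounts]
  set L := PySem.List.pyRange 1 (((9 * nlenN N : Nat) : Int) + 1) 1 with hL
  set counts := L.map (fun s => ((resSpec N).count s : Int)) with hc
  have hlen : counts ≠ [] := by
    apply List.ne_nil_of_length_pos
    rw [hc, List.length_map, hL, PySem.List.length_pyRange_one]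
    have h1 : 1 ≤ nlenN N := nlenN_pos (by omega)
    omega
  cases hm0 : PySem.List.max? counts (fun x => x) with
  | none => exact absurd ((PySem.List.max?_eq_none_iff _ _).mp hm0) hlen
  | some m0 =>
    simp only [Option.getD_some]
    have hmem0 : m0 ∈ counts := PySem.List.max?_mem hm0
    have hismax : ∀ y ∈ counts, y ≤ m0 := fun y hy => PySem.List.max?_isMax hm0 y hy
    have hub : ∀ v ∈ counts, v ≤ maxA N := by
      intro v hv
      rw [hc] at hv
      rcases List.mem_map.mp hv with ⟨s, hsL, rfl⟩
      by_cases hsr : s ∈ resSpec N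
      · exact (PySem.List.le_foldl_max (valsA N) 0).2 _
          (List.mem_map_of_mem ((PySem.Set.mem_ofList _ _).mpr hsr))
      · have hz : (resSpec N).count s = 0 := List.count_eq_zero.mpr hsr
        rw [hz]
        exact_mod_cast maxA_nonneg N
    have hmaxmem : maxA N ∈ counts := by
      have h1 : 1 ≤ maxA N := maxA_pos (by omega)
      rcases PySem.List.foldl_max_mem (valsA N) 0 with h | h
      · exfalso
        unfold maxA at h1
        omega
      · rcases List.mem_map.mp h with ⟨s0, hs0, hv0⟩
        have hs0r : s0 ∈ resSpec N := (PySem.Set.mem_ofList _ _).mp hs0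
        have hb := mem_resSpec_bounds hs0r
        rw [hc]
        apply List.mem_map.mpr
        refine ⟨s0, ?_, ?_⟩
        · rw [hL]
          exact PySem.List.mem_pyRange_one.mpr ⟨hb.1, by omega⟩
        · unfold maxA
          exact hv0
    have hm0eq : m0 = maxA N := le_antisymm (hub m0 hmem0) (hismax _ hmaxmem)
    rw [hm0eq, show PySem.List.count counts (maxA N) = counts.count (maxA N) from rfl,
        List.count_eq_countP, hc, List.countP_map]
    congr 1

-- ===== VERDICT (by name: the statement is the Claim_ definition above) =====
theorem lotteryCoupon_spec : Claim_equal_lotteryCoupon := by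
  intro n _
  unfold Spec_lotteryCoupon
  by_cases hn : n < 10
  · rw [lotteryCoupon, lotteryCoupon_alt, if_pos hn, if_pos hn]
  · obtain ⟨N, rfl⟩ : ∃ N : Nat, n = (N : Int) := ⟨n.toNat, (Int.toNat_of_nonneg (by omega)).symm⟩
    have hN : 10 ≤ N := by omega
    rw [A_char hN, B_char hN]
    unfold valsA
    rw [List.countP_map]
    congr 1
    have hcomp : ((fun v => decide (v = maxA N)) ∘ (fun s : Int => ((resSpec N).count s : Int)))
        = (fun s : Int => decide (((resSpec N).count s : Int) = maxA N)) := rfl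
    rw [hcomp]
    apply countP_eq_of_nodup
    · exact PySem.Set.nodup_ofList _
    · exact PySem.List.nodup_pyRange_one 1 _
    · intro s hp
      have hps : ((resSpec N).count s : Int) = maxA N := by
        simpa using hp
      have hpos : 0 < (resSpec N).count s := by
        have := maxA_pos (show 1 ≤ N by omega)
        omega
      have hmem : s ∈ resSpec N := List.count_pos_iff.mp hpos
      have hb := mem_resSpec_bounds hmem
      exact ⟨(PySem.Set.mem_ofList _ _).mpr hmem, PySem.List.mem_pyRange_one.mpr ⟨hb.1, by omega⟩⟩
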